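-- pv_equiv track=rewrite | github.com/davidetsm/Examens-Programacio | 2021-2022/2021/Parcial grup 2 (meu)/ej3.py | productoColumnas
-- ===== SOURCE A (Python) =====
-- def productoColumnas(matriz, n, m):
--
--     fila_productos = []
--     for j in range(m):
--         producto = 1
--         for i in range(n):
--             producto *= matriz[i][j]
--         fila_productos.append(producto)
--     matriz.append(fila_productos)
--     return matriz
-- ===== SOURCE B (Python) =====
-- def productoColumnas(matriz, n, m):
--     fila_productos = [1] * m
--     if fila_productos:
--         for i in range(n):
--             for j in range(m):
--                 fila_productos[j] *= matriz[i][j]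
--     matriz.append(fila_productos)
--     return matriz
-- ===== Notes on version B (the rewrite author's own statement) =====
-- stated objective: alternative
-- what changed: B traverses the matrix row-major maintaining an m-element array of running products ([1]*m updated in place per row), instead of A's column-major nested loops that recompute each column product into a scalar.
import Mathlib
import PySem

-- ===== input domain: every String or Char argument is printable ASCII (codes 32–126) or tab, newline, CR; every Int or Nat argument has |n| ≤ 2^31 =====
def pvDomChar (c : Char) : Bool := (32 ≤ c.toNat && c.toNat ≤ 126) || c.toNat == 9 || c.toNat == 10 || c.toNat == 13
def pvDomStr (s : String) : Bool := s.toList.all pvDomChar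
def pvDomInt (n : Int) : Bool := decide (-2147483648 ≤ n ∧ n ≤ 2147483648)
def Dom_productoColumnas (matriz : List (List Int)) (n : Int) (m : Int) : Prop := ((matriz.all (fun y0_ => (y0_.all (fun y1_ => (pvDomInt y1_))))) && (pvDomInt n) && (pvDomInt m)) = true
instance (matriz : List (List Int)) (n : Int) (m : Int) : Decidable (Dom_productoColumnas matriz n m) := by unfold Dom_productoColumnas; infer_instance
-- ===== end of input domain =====

-- B maintains an m-element running-product array updated row-major, instead of A's
-- column-major scalar accumulation; same cost, different decomposition (return-value
-- equivalence; both Pythons append the new row to `matriz` in place alike).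


-- ===== PORT A =====
def productoColumnas (matriz : List (List Int)) (n : Int) (m : Int) : List (List Int) :=
  let fila_productos :=
    (PySem.List.pyRange 0 m 1).foldl (fun acc j =>
      acc ++ [(PySem.List.pyRange 0 n 1).foldl
        (fun producto i =>
          producto * PySem.List.pyGetD (PySem.List.pyGetD matriz i []) j 1) 1]) []
  matriz ++ [fila_productos]

-- ===== PORT B =====
def productoColumnas_alt (matriz : List (List Int)) (n : Int) (m : Int) : List (List Int) :=
  let init := PySem.List.pyRepeat [1] m
  let fila_productos :=
    if init.isEmpty then init
    else
      (PySem.List.pyRange 0 n 1).foldl (fun acc i =>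
        (PySem.List.pyRange 0 m 1).foldl (fun a j =>
          PySem.List.pySetD a j
            (PySem.List.pyGetD a j 1 *
              PySem.List.pyGetD (PySem.List.pyGetD matriz i []) j 1)) acc) init
  matriz ++ [fila_productos]

-- ===== PRECONDITION & SPEC =====
-- Pre_ excludes exactly the inputs on which Python A raises IndexError:
-- when n > 0 and m > 0, every index matriz[i][j] with i < n, j < m must exist.
def Pre_productoColumnas (matriz : List (List Int)) (n : Int) (m : Int) : Prop :=
  (0 < n ∧ 0 < m) →
    (n ≤ (matriz.length : Int) ∧
      ∀ row ∈ matriz.take n.toNat, m ≤ (row.length : Int))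
instance (matriz : List (List Int)) (n : Int) (m : Int) : Decidable (Pre_productoColumnas matriz n m) := by unfold Pre_productoColumnas; infer_instance
def pvWitness_productoColumnas : List (List Int) × Int × Int := ([[2, 3], [4, 5]], 2, 2)

def Spec_productoColumnas (matriz : List (List Int)) (n : Int) (m : Int) (out : List (List Int)) : Prop := out = productoColumnas_alt matriz n m
instance (matriz : List (List Int)) (n : Int) (m : Int) (out : List (List Int)) : Decidable (Spec_productoColumnas matriz n m out) := by unfold Spec_productoColumnas; infer_instance

-- ===== CLAIM (what is proved, stated in full; the proofs are below) =====
def Claim_equal_productoColumnas : Prop := ∀ (matriz : List (List Int)) (n : Int) (m : Int), Dom_productoColumnas matriz n m → Pre_productoColumnas matriz n m → Spec_productoColumnas matriz n m (productoColumnas matriz n m)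

-- ===== LEMMAS AND PROOFS =====

-- After one row-major pass over indices 0..M-1, each slot j of the accumulator is
-- multiplied in place by f j; a tail beyond the touched prefix is untouched.
theorem pv_inner_pass (f : Int → Int) (M : Nat) (h : Int → Int) (tail : List Int) :
    (PySem.List.pyRange 0 (M : Int) 1).foldl
        (fun a j => PySem.List.pySetD a j (PySem.List.pyGetD a j 1 * f j))
        ((PySem.List.pyRange 0 (M : Int) 1).map h ++ tail)
      = (PySem.List.pyRange 0 (M : Int) 1).map (fun j => h j * f j) ++ tail := by
  induction M generalizing tail with
  | zero => simp
  | succ k ih =>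
    have hsplit : PySem.List.pyRange 0 ((k + 1 : Nat) : Int) 1
        = PySem.List.pyRange 0 (k : Int) 1 ++ [(k : Int)] := by
      push_cast
      exact PySem.List.pyRange_one_succ_right (by positivity)
    rw [hsplit]
    simp only [List.map_append, List.foldl_append, List.map_cons, List.map_nil,
      List.append_assoc, List.cons_append, List.nil_append]
    rw [ih (h k :: tail)]
    have hlen : ((PySem.List.pyRange 0 (k : Int) 1).map (fun j => h j * f j)).length = k := by
      simp [PySem.List.length_pyRange_one]
    simp only [List.foldl_cons, List.foldl_nil, PySem.List.pySetD_natCast,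
      PySem.List.pyGetD_natCast]
    rw [show k = ((PySem.List.pyRange 0 (k : Int) 1).map (fun j => h j * f j)).length
          from hlen.symm]
    simp [List.getD_eq_getElem?_getD]

-- Folding the row-major update over any list of row indices L, starting from the
-- pointwise image of h, yields in slot j the left fold of the column-j entries.
theorem pv_outer_pass (g : Int → Int → Int) (M : Nat) (L : List Int) (h : Int → Int) :
    L.foldl (fun acc i =>
        (PySem.List.pyRange 0 (M : Int) 1).foldl
          (fun a j => PySem.List.pySetD a j (PySem.List.pyGetD a j 1 * g i j)) acc)
        ((PySem.List.pyRange 0 (M : Int) 1).map h)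
      = (PySem.List.pyRange 0 (M : Int) 1).map
          (fun j => L.foldl (fun p i => p * g i j) (h j)) := by
  induction L generalizing h with
  | nil => simp
  | cons i L ih =>
    simp only [List.foldl_cons]
    have := pv_inner_pass (fun j => g i j) M h []
    simp only [List.append_nil] at this
    rw [this, ih (fun j => h j * g i j)]

-- Any pyRange 0 m 1 is the range over m.toNat.
theorem pv_range_toNat (m : Int) :
    PySem.List.pyRange 0 m 1 = PySem.List.pyRange 0 (m.toNat : Int) 1 := by
  by_cases hm : m ≤ 0
  · rw [PySem.List.pyRange_one_eq_nil hm, PySem.List.pyRange_one_eq_nil (by omega)]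
  · rw [Int.toNat_of_nonneg (by omega)]

theorem pv_repeat_eq_map (m : Int) :
    PySem.List.pyRepeat ([1] : List Int) m
      = (PySem.List.pyRange 0 (m.toNat : Int) 1).map (fun _ => 1) := by
  rw [PySem.List.pyRepeat_singleton, List.map_const']
  simp only [PySem.List.length_pyRange_one]
  congr 1


-- The two ports in fact agree on every input (totalised indexing agrees by construction).
theorem pv_ports_agree (matriz : List (List Int)) (n m : Int) :
    productoColumnas matriz n m = productoColumnas_alt matriz n m := by
  unfold productoColumnas productoColumnas_alt
  rw [PySem.List.foldl_append_singleton_eq_map, List.nil_append]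
  by_cases hm : m ≤ 0
  · rw [PySem.List.pyRange_one_eq_nil hm, PySem.List.pyRepeat_singleton]
    simp [Int.toNat_of_nonpos hm]
  · have hne : ¬ (PySem.List.pyRepeat ([1] : List Int) m).isEmpty := by
      rw [PySem.List.pyRepeat_singleton]
      simp
      omega
    simp only [hne, if_false, Bool.false_eq_true]
    rw [pv_range_toNat m, pv_repeat_eq_map m,
        pv_outer_pass (fun i j => PySem.List.pyGetD (PySem.List.pyGetD matriz i []) j 1)
          m.toNat (PySem.List.pyRange 0 n 1) (fun _ => 1)]

-- ===== VERDICT (by name: the statement is the Claim_ definition above) =====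
theorem productoColumnas_spec : Claim_equal_productoColumnas := by
  intro matriz n m _ _
  exact pv_ports_agree matriz n m
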